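-- pv_equiv track=rewrite | github.com/muhammadnoorulainroy/smart-lighting-scenes-with-natural-language | embedded/esp32_controller_2/wifi_provisioning.py | parse_form_data
-- ===== SOURCE A (Python) =====
-- def url_decode(s):
--     """Decode URL-encoded string."""
--     result = []
--     i = 0
--     while i < len(s):
--         if s[i] == '%' and i + 2 < len(s):
--             try:
--                 result.append(chr(int(s[i+1:i+3], 16)))
--                 i += 3
--                 continue
--             except ValueError:
--                 pass
--         elif s[i] == '+':
--             result.append(' ')
--             i += 1
--             continue
--         result.append(s[i])
--         i += 1
--     return ''.join(result)
--
-- def parse_form_data(body):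
--     """Parse URL-encoded form data."""
--     data = {}
--     if not body:
--         return data
--     for pair in body.split('&'):
--         if '=' in pair:
--             key, value = pair.split('=', 1)
--             data[url_decode(key)] = url_decode(value)
--     return data
-- ===== SOURCE B (Python) =====
-- # Split-on-'%' decoder: each chunk after a '%' tries chr(int(first two chars, 16)), the rest of
-- # the chunk is literal text with '+' as space; pairs are read with partition into a dict.
-- def _decode(s):
--     first, *rest = s.split('%')
--     out = [first.replace('+', ' ')]
--     for part in rest:
--         decoded = None
--         if len(part) >= 2:
--             try:
--                 decoded = chr(int(part[:2], 16))
--             except ValueError: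
--                 pass
--         if decoded is None:
--             out.append('%' + part.replace('+', ' '))
--         else:
--             out.append(decoded + part[2:].replace('+', ' '))
--     return ''.join(out)
--
--
-- def parse_form_data(body):
--     """Parse URL-encoded form data."""
--     data = {}
--     for pair in body.split('&'):
--         key, sep, value = pair.partition('=')
--         if sep:
--             data[_decode(key)] = _decode(value)
--     return data
-- ===== Notes on version B (the rewrite author's own statement) =====
-- stated objective: alternative
-- what changed: url_decode's index-walking while-loop with manual i+=1/i+=3 stepping becomes a split-on-'%' chunk decoder (each chunk tries chr(int(part[:2],16)), the rest is literal with '+'->' ' via str.replace), and parse_form_data's membership-test plus split('=',1) dict loop becomes a partition-based loop.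
import Mathlib
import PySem

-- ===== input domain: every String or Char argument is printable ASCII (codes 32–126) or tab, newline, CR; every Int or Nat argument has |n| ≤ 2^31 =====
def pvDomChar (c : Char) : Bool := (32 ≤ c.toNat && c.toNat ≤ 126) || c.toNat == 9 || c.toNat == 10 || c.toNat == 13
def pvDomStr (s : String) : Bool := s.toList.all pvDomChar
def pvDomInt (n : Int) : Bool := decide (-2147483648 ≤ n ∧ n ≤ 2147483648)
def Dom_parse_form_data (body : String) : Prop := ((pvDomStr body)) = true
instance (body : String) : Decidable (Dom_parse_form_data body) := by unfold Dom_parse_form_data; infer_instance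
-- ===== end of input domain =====

-- B decodes by splitting on '%' and trying chr(int(.,16)) on each chunk's first two characters,
-- instead of A's index-walking while-loop; pairs are read with partition instead of a membership
-- test plus split('=',1).  The claim proves equal return values on the stated ASCII domain.

-- ===== PORT A =====
-- char utilities (hex digit test and value, Python's stripped whitespace)
def pvIsHex (c : Char) : Bool :=
  ('0' ≤ c && c ≤ '9') || ('a' ≤ c && c ≤ 'f') || ('A' ≤ c && c ≤ 'F')

def pvHexVal (c : Char) : Nat :=
  if '0' ≤ c && c ≤ '9' then c.toNat - 48
  else if 'a' ≤ c then c.toNat - 87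
  else c.toNat - 55

def pvIsPyWs (c : Char) : Bool :=
  c == ' ' || c == '\t' || c == '\n' || c == '\r' || c == '\x0b' || c == '\x0c'

-- hand port of Python's int(s, 16) restricted to a two-character string s over the ASCII domain:
-- int strips surrounding whitespace and an optional sign, so besides two hex digits it also accepts
-- '<ws><hex>', '<hex><ws>', '+<hex>' and '-<hex>'.  Exact on two-char ASCII inputs.
def pvLooseInt16? (a b : Char) : Option Int :=
  if pvIsHex a && pvIsHex b then some ((16 * pvHexVal a + pvHexVal b : Nat) : Int)
  else if pvIsPyWs a && pvIsHex b then some ((pvHexVal b : Nat) : Int)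
  else if pvIsHex a && pvIsPyWs b then some ((pvHexVal a : Nat) : Int)
  else if a == '+' && pvIsHex b then some ((pvHexVal b : Nat) : Int)
  else if a == '-' && pvIsHex b then some (-((pvHexVal b : Nat) : Int))
  else none

-- hand port of chr(v): ValueError (none) outside 0..0x10FFFF; exact for the values ≤ 255 produced above
def pvChr? (v : Int) : Option Char :=
  if 0 ≤ v && v < 1114112 then some (Char.ofNat v.toNat) else none

-- url_decode's while loop, as structural recursion on the remaining characters (state i ↦ suffix s[i:]);
-- the try block is the Option bind: ValueError from int or chr falls through to appending s[i]
def pvUrlDecodeA : List Char → List Char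
  | [] => []
  | '%' :: a :: b :: q =>
    match (pvLooseInt16? a b).bind pvChr? with
    | some ch => ch :: pvUrlDecodeA q
    | none => '%' :: pvUrlDecodeA (a :: b :: q)
  | '+' :: rest => ' ' :: pvUrlDecodeA rest
  | c :: rest => c :: pvUrlDecodeA rest

def parse_form_data (body : String) : List (String × String) :=
  let data : PySem.Dict String String := PySem.Dict.empty
  if body = "" then data.items
  else
    ((PySem.Chars.splitOn body.toList ['&']).foldl
      (fun d pair =>
        if PySem.Chars.isIn ['='] pair = true then
          match PySem.Chars.splitOnMax pair ['='] 1 with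
          | k :: v :: _ => d.insert (String.ofList (pvUrlDecodeA k)) (String.ofList (pvUrlDecodeA v))
          | _ => d
        else d) data).items

-- ===== PORT B =====
-- p.partition('=') for the one-char separator: none = separator absent (Python's empty sep field)
def pvPartEq : List Char → Option (List Char × List Char)
  | [] => none
  | '=' :: rest => some ([], rest)
  | c :: rest => (pvPartEq rest).map (fun kv => (c :: kv.1, kv.2))

-- one iteration of _decode's loop: try chr(int(part[:2], 16)) (the same int/chr semantics as in
-- port A's helpers, since Source B calls the same builtins), else keep '%' + chunk; '+' becomes ' '
-- in the literal text via part.replace('+', ' ')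
def pvDecChunk (part : List Char) : List Char :=
  match part with
  | a :: b :: t =>
    (match (pvLooseInt16? a b).bind pvChr? with
     | some ch => ch :: PySem.Chars.replace t ['+'] [' ']
     | none => '%' :: PySem.Chars.replace part ['+'] [' '])
  | _ => '%' :: PySem.Chars.replace part ['+'] [' ']

-- _decode: s.split('%'), first chunk with '+'→' ', then append each decoded chunk
def pvDecodeB (cs : List Char) : List Char :=
  match PySem.Chars.splitOn cs ['%'] with
  | [] => []
  | first :: rest =>
    rest.foldl (fun out part => out ++ pvDecChunk part) (PySem.Chars.replace first ['+'] [' '])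

def parse_form_data_alt (body : String) : List (String × String) :=
  ((PySem.Chars.splitOn body.toList ['&']).foldl
    (fun d p =>
      match pvPartEq p with
      | some (k, v) => d.insert (String.ofList (pvDecodeB k)) (String.ofList (pvDecodeB v))
      | none => d) (PySem.Dict.empty : PySem.Dict String String)).items

-- ===== PRECONDITION & SPEC =====
def Spec_parse_form_data (body : String) (out : List (String × String)) : Prop :=
  out = parse_form_data_alt body
instance (body : String) (out : List (String × String)) : Decidable (Spec_parse_form_data body out) := by unfold Spec_parse_form_data; infer_instance

-- ===== CLAIM (what is proved, stated in full; the proofs are below) =====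
def Claim_equal_parse_form_data : Prop :=
  ∀ (body : String), Dom_parse_form_data body → Spec_parse_form_data body (parse_form_data body)

-- ===== LEMMAS AND PROOFS =====

def pvPlus (c : Char) : Char := if c = '+' then ' ' else c

-- ---- replace('+',' ') characterization ----
theorem pvReplaceGo_plus (l : List Char) : ∀ (fuel : Nat) (acc : List Char), l.length ≤ fuel →
    PySem.Chars.replace.go ['+'] [' '] fuel l acc = acc.reverse ++ l.map pvPlus := by
  induction l with
  | nil => intro fuel acc h; cases fuel <;> simp [PySem.Chars.replace.go]
  | cons c rest ih =>
    intro fuel acc h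
    cases fuel with
    | zero => simp at h
    | succ f =>
      by_cases hc : c = '+'
      · subst hc
        simp only [PySem.Chars.replace.go]
        rw [if_pos (by simp [List.isPrefixOf])]
        rw [show List.drop ['+'].length ('+' :: rest) = rest from rfl]
        rw [ih f ([' '].reverse ++ acc) (by simp at h; omega)]
        simp [pvPlus]
      · have hpre : (['+'].isPrefixOf (c :: rest)) = false := by
          simp [List.isPrefixOf]; exact fun e => hc e.symm
        simp only [PySem.Chars.replace.go]
        rw [if_neg (by simp [hpre]), ih f (c :: acc) (by simp at h; omega)]
        simp [pvPlus, hc]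

theorem pvReplace_plus (cs : List Char) :
    PySem.Chars.replace cs ['+'] [' '] = cs.map pvPlus := by
  unfold PySem.Chars.replace
  rw [if_neg (by simp)]
  simpa using pvReplaceGo_plus cs cs.length [] le_rfl

-- ---- split('%') characterization ----
def pvSplit : List Char → List (List Char)
  | [] => [[]]
  | c :: r =>
    if c = '%' then [] :: pvSplit r
    else match pvSplit r with
      | h :: t => (c :: h) :: t
      | [] => [[c]]

theorem pvSplit_ne_nil (l : List Char) : pvSplit l ≠ [] := by
  cases l with
  | nil => simp [pvSplit]
  | cons c r =>
    simp only [pvSplit]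
    split_ifs
    · simp
    · cases h : pvSplit r <;> simp

theorem pvSplit_pct (r : List Char) : pvSplit ('%' :: r) = [] :: pvSplit r := by
  simp [pvSplit]

theorem pvSplit_cons_ne (c : Char) (r : List Char) (hc : c ≠ '%') :
    pvSplit (c :: r) =
      (match pvSplit r with
       | h :: t => (c :: h) :: t
       | [] => [[c]]) := by
  simp [pvSplit, hc]

theorem pvSplitOnGo (l : List Char) : ∀ (fuel : Nat) (cur : List Char) (acc : List (List Char)),
    l.length < fuel →
    PySem.Chars.splitOn.go ['%'] fuel l cur acc =
      acc.reverse ++ (match pvSplit l with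
        | h :: t => (cur.reverse ++ h) :: t
        | [] => [cur.reverse]) := by
  induction l with
  | nil =>
    intro fuel cur acc h
    cases fuel with
    | zero => omega
    | succ f => simp [PySem.Chars.splitOn.go, pvSplit]
  | cons c rest ih =>
    intro fuel cur acc h
    cases fuel with
    | zero => omega
    | succ f =>
      by_cases hc : c = '%'
      · subst hc
        simp only [PySem.Chars.splitOn.go]
        rw [if_pos (by simp [List.isPrefixOf])]
        rw [show List.drop ['%'].length ('%' :: rest) = rest from rfl]
        rw [ih f [] (cur.reverse :: acc) (by simp at h; omega)]
        rw [pvSplit_pct]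
        cases hs : pvSplit rest with
        | nil => exact absurd hs (pvSplit_ne_nil rest)
        | cons h0 t0 => simp
      · have hpre : (['%'].isPrefixOf (c :: rest)) = false := by
          simp [List.isPrefixOf]; exact fun e => hc e.symm
        simp only [PySem.Chars.splitOn.go]
        rw [if_neg (by simp [hpre]), ih f (c :: cur) acc (by simp at h; omega)]
        rw [pvSplit_cons_ne c rest hc]
        cases hs : pvSplit rest with
        | nil => exact absurd hs (pvSplit_ne_nil rest)
        | cons h0 t0 => simp

theorem pvSplitOn_eq (cs : List Char) : PySem.Chars.splitOn cs ['%'] = pvSplit cs := by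
  unfold PySem.Chars.splitOn
  rw [pvSplitOnGo cs (cs.length + 1) [] [] (by omega)]
  cases hs : pvSplit cs with
  | nil => exact absurd hs (pvSplit_ne_nil cs)
  | cons h t => simp

-- ---- equations of A's decoder ----
theorem pvA_pct (a b : Char) (q : List Char) :
    pvUrlDecodeA ('%' :: a :: b :: q) =
      (match (pvLooseInt16? a b).bind pvChr? with
       | some ch => ch :: pvUrlDecodeA q
       | none => '%' :: pvUrlDecodeA (a :: b :: q)) := by
  simp [pvUrlDecodeA]

theorem pvA_pct_short (r : List Char) (h : r.length ≤ 1) :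
    pvUrlDecodeA ('%' :: r) = '%' :: pvUrlDecodeA r := by
  match r, h with
  | [], _ => simp [pvUrlDecodeA]
  | [x], _ => simp [pvUrlDecodeA]

theorem pvStepA (c : Char) (r : List Char) (hc : c ≠ '%') :
    pvUrlDecodeA (c :: r) = pvPlus c :: pvUrlDecodeA r := by
  by_cases hp : c = '+'
  · subst hp
    simp [pvUrlDecodeA, pvPlus]
  · rw [show pvPlus c = c by unfold pvPlus; rw [if_neg hp]]
    cases r with
    | nil => simp [pvUrlDecodeA, hc, hp]
    | cons x y =>
      cases y with
      | nil => simp [pvUrlDecodeA, hc, hp]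
      | cons x2 y2 => simp [pvUrlDecodeA, hc, hp]

theorem pvA_singleton (c : Char) : pvUrlDecodeA [c] = [pvPlus c] := by
  by_cases hc : c = '%'
  · subst hc
    rw [show pvPlus '%' = '%' from rfl]
    simp [pvUrlDecodeA]
  · rw [pvStepA c [] hc]
    simp [pvUrlDecodeA]

-- int(s, 16) fails on any two-character slice containing '%'
theorem pvLoose_pct_left (b : Char) : pvLooseInt16? '%' b = none := by
  have h1 : pvIsHex '%' = false := by decide
  have h2 : pvIsPyWs '%' = false := by decide
  simp [pvLooseInt16?, h1, h2]

theorem pvLoose_pct_right (a : Char) : pvLooseInt16? a '%' = none := by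
  have h1 : pvIsHex '%' = false := by decide
  have h2 : pvIsPyWs '%' = false := by decide
  simp [pvLooseInt16?, h1, h2]

-- rewrite B's chunk decoding through the replace lemma
theorem pvDecChunk_short (part : List Char) (h : part.length <= 1) :
    pvDecChunk part = '%' :: part.map pvPlus := by
  match part, h with
  | [], _ => simp [pvDecChunk, pvReplace_plus]
  | [x], _ => simp [pvDecChunk, pvReplace_plus]

theorem pvDecChunk_cc (a b : Char) (t : List Char) :
    pvDecChunk (a :: b :: t) =
      (match (pvLooseInt16? a b).bind pvChr? with
       | some ch => ch :: t.map pvPlus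
       | none => '%' :: (a :: b :: t).map pvPlus) := by
  cases hb : (pvLooseInt16? a b).bind pvChr? <;>
    simp [pvDecChunk, pvReplace_plus, hb]

-- ---- joining the decoded chunks = A's decoder ----
def pvJoin (l : List Char) : List Char :=
  match pvSplit l with
  | [] => []
  | f :: r => f.map pvPlus ++ r.flatMap pvDecChunk

theorem pvJoin_A : ∀ (n : Nat) (l : List Char), l.length ≤ n →
    pvJoin l = pvUrlDecodeA l ∧ (pvSplit l).flatMap pvDecChunk = pvUrlDecodeA ('%' :: l) := by
  intro n
  induction n with
  | zero =>
    intro l h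
    have hl : l = [] := List.eq_nil_of_length_eq_zero (by omega)
    subst hl
    refine ⟨by simp [pvJoin, pvSplit, pvUrlDecodeA], ?_⟩
    rw [show (pvSplit []).flatMap pvDecChunk = pvDecChunk [] ++ [] by rfl,
      pvDecChunk_short [] (by simp), pvA_pct_short [] (by simp)]
    simp [pvUrlDecodeA]
  | succ m ih =>
    intro l h
    cases l with
    | nil =>
      refine ⟨by simp [pvJoin, pvSplit, pvUrlDecodeA], ?_⟩
      rw [show (pvSplit []).flatMap pvDecChunk = pvDecChunk [] ++ [] by rfl,
        pvDecChunk_short [] (by simp), pvA_pct_short [] (by simp)]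
      simp [pvUrlDecodeA]
    | cons a r =>
      have hr := ih r (by simp at h; omega)
      by_cases ha : a = '%'
      · subst ha
        have h2 : (pvSplit ('%' :: r)).flatMap pvDecChunk = pvUrlDecodeA ('%' :: '%' :: r) := by
          rw [pvSplit_pct, List.flatMap_cons, pvDecChunk_short [] (by simp)]
          simp only [List.map_nil]
          rw [hr.2]
          cases r with
          | nil => rw [pvA_pct_short ['%'] (by simp)]; rfl
          | cons b q =>
            rw [pvA_pct '%' b q, pvLoose_pct_left b]
            rfl
        refine ⟨?_, h2⟩
        unfold pvJoin
        rw [pvSplit_pct]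
        cases hs : pvSplit r with
        | nil => exact absurd hs (pvSplit_ne_nil r)
        | cons h0 t0 =>
          have := hr.2
          rw [hs] at this
          simpa using this
      · -- a ≠ '%'
        have h2 : (pvSplit (a :: r)).flatMap pvDecChunk = pvUrlDecodeA ('%' :: a :: r) := by
          cases r with
          | nil =>
            rw [pvSplit_cons_ne a [] ha]
            rw [show pvSplit ([] : List Char) = [[]] from rfl]
            simp only [List.flatMap_cons, List.flatMap_nil]
            rw [pvDecChunk_short [a] (by simp)]
            rw [pvA_pct_short [a] (by simp), pvA_singleton]
            rfl
          | cons b q =>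
            have hq := ih q (by simp at h; omega)
            by_cases hb : b = '%'
            · subst hb
              rw [pvSplit_cons_ne a ('%' :: q) ha, pvSplit_pct]
              simp only [List.flatMap_cons]
              rw [pvDecChunk_short [a] (by simp)]
              simp only [List.map_cons, List.map_nil]
              rw [hq.2]
              rw [pvA_pct a '%' q, pvLoose_pct_right a]
              rw [pvStepA a ('%' :: q) ha]
              rfl
            · -- b ≠ '%': pvSplit (a :: b :: q) = (a :: b :: h1) :: t1 with pvSplit q = h1 :: t1
              cases hs : pvSplit q with
              | nil => exact absurd hs (pvSplit_ne_nil q)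
              | cons h1 t1 =>
                have hsplit : pvSplit (a :: b :: q) = (a :: b :: h1) :: t1 := by
                  rw [pvSplit_cons_ne a (b :: q) ha, pvSplit_cons_ne b q hb, hs]
                rw [hsplit, List.flatMap_cons, pvDecChunk_cc a b h1]
                have hjoin : h1.map pvPlus ++ t1.flatMap pvDecChunk = pvUrlDecodeA q := by
                  have := hq.1
                  unfold pvJoin at this
                  rw [hs] at this
                  exact this
                rw [pvA_pct a b q]
                cases hbind : (pvLooseInt16? a b).bind pvChr? with
                | some ch =>
                  show (ch :: List.map pvPlus h1) ++ List.flatMap pvDecChunk t1 =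
                    ch :: pvUrlDecodeA q
                  rw [← hjoin]
                  simp
                | none =>
                  show ('%' :: pvPlus a :: pvPlus b :: List.map pvPlus h1) ++
                      List.flatMap pvDecChunk t1 = '%' :: pvUrlDecodeA (a :: b :: q)
                  rw [pvStepA a (b :: q) ha, pvStepA b q hb, ← hjoin]
                  simp
        refine ⟨?_, h2⟩
        unfold pvJoin
        cases hs : pvSplit r with
        | nil => exact absurd hs (pvSplit_ne_nil r)
        | cons h0 t0 =>
          rw [pvSplit_cons_ne a r ha, hs]
          have := hr.1
          unfold pvJoin at this
          rw [hs] at this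
          simp only at this
          rw [pvStepA a r ha, ← this]
          simp

theorem pvDecode_agree (cs : List Char) : pvUrlDecodeA cs = pvDecodeB cs := by
  unfold pvDecodeB
  rw [pvSplitOn_eq]
  cases hs : pvSplit cs with
  | nil => exact absurd hs (pvSplit_ne_nil cs)
  | cons f r =>
    simp only
    rw [pvReplace_plus, PySem.List.foldl_append_eq_flatMap pvDecChunk r (f.map pvPlus)]
    have := (pvJoin_A cs.length cs le_rfl).1
    unfold pvJoin at this
    rw [hs] at this
    exact this.symm

-- ---- partition and split('=',1) ----
theorem pvPartEq_none_iff (p : List Char) : pvPartEq p = none ↔ '=' ∉ p := by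
  induction p with
  | nil => simp [pvPartEq]
  | cons c rest ih =>
    by_cases hc : c = '='
    · subst hc; simp [pvPartEq]
    · rw [show pvPartEq (c :: rest) = (pvPartEq rest).map (fun kv => (c :: kv.1, kv.2)) by
        cases rest <;> simp [pvPartEq, hc]]
      cases h : pvPartEq rest with
      | none =>
        simp [h] at ih ⊢
        exact ⟨fun e => hc e.symm, ih⟩
      | some kv =>
        simp [h] at ih ⊢
        exact fun _ => ih

theorem pvGo0 (fuel : Nat) (l : List Char) (acc : List (List Char)) :
    PySem.Chars.splitOnMax.go ['='] fuel 0 l [] acc = (l :: acc).reverse := by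
  cases fuel with
  | zero => simp [PySem.Chars.splitOnMax.go]
  | succ f => cases l <;> simp [PySem.Chars.splitOnMax.go]

theorem pvGo1 (l : List Char) : ∀ (fuel : Nat) (cur : List Char) (acc : List (List Char)),
    l.length < fuel →
    PySem.Chars.splitOnMax.go ['='] fuel 1 l cur acc =
      (match pvPartEq l with
       | some (k, v) => acc.reverse ++ [cur.reverse ++ k, v]
       | none => acc.reverse ++ [cur.reverse ++ l]) := by
  induction l with
  | nil =>
    intro fuel cur acc hf
    cases fuel with
    | zero => omega
    | succ f => simp [PySem.Chars.splitOnMax.go, pvPartEq]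
  | cons c rest ih =>
    intro fuel cur acc hf
    cases fuel with
    | zero => omega
    | succ f =>
      by_cases hc : c = '='
      · subst hc
        simp only [PySem.Chars.splitOnMax.go]
        simp [List.isPrefixOf, pvGo0, pvPartEq]
      · have hpre : ['='].isPrefixOf (c :: rest) = false := by
          simp [List.isPrefixOf]; exact fun e => hc e.symm
        simp only [PySem.Chars.splitOnMax.go]
        rw [show pvPartEq (c :: rest) = (pvPartEq rest).map (fun kv => (c :: kv.1, kv.2)) by
          cases rest <;> simp [pvPartEq, hc]]
        have hlen : rest.length < f := by simp at hf; omega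
        rw [ih f (c :: cur) acc hlen]
        cases hr : pvPartEq rest with
        | none => simp [hpre, hr]
        | some kv => simp [hpre, hr]

theorem pvSplitOnMax_partEq (p k v : List Char) (h : pvPartEq p = some (k, v)) :
    PySem.Chars.splitOnMax p ['='] 1 = [k, v] := by
  unfold PySem.Chars.splitOnMax
  rw [if_neg (by omega)]
  rw [show Int.toNat 1 = 1 from rfl, pvGo1 p (p.length + 1) [] [] (by omega)]
  simp [h]

theorem pvIsIn_partEq (p : List Char) :
    PySem.Chars.isIn ['='] p = true ↔ pvPartEq p ≠ none := by
  rw [PySem.Chars.isIn_iff_infix, List.singleton_infix_iff, ← not_iff_not, not_not,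
    pvPartEq_none_iff p]

-- ---- parse-level agreement ----
theorem pvStep_eq (d : PySem.Dict String String) (p : List Char) :
    (if PySem.Chars.isIn ['='] p = true then
      match PySem.Chars.splitOnMax p ['='] 1 with
      | k :: v :: _ => d.insert (String.ofList (pvUrlDecodeA k)) (String.ofList (pvUrlDecodeA v))
      | _ => d
     else d) =
    (match pvPartEq p with
     | some (k, v) => d.insert (String.ofList (pvDecodeB k)) (String.ofList (pvDecodeB v))
     | none => d) := by
  by_cases hin : PySem.Chars.isIn ['='] p = true
  · obtain ⟨kv, hkv⟩ := Option.ne_none_iff_exists'.mp ((pvIsIn_partEq p).mp hin)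
    obtain ⟨k, v⟩ := kv
    rw [if_pos hin, hkv, pvSplitOnMax_partEq p k v hkv]
    show d.insert (String.ofList (pvUrlDecodeA k)) (String.ofList (pvUrlDecodeA v)) =
      d.insert (String.ofList (pvDecodeB k)) (String.ofList (pvDecodeB v))
    rw [pvDecode_agree k, pvDecode_agree v]
  · rw [if_neg hin]
    have hnone : pvPartEq p = none := by
      by_contra hne
      exact hin ((pvIsIn_partEq p).mpr hne)
    rw [hnone]

-- ===== VERDICT (by name: the statement is the Claim_ definition above) =====
theorem parse_form_data_spec : Claim_equal_parse_form_data := by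
  intro body _hDom
  unfold Spec_parse_form_data
  by_cases hb : body = ""
  · subst hb
    decide
  · unfold parse_form_data parse_form_data_alt
    rw [if_neg hb]
    congr 1
    exact PySem.List.foldl_congr_mem _ _ _ _ (fun d p _ => pvStep_eq d p)
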